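-- pv_equiv track=rewrite | github.com/AdamZhouSE/pythonHomework | Code/CodeRecords/2203/60676/235312.py | get_mystery
-- ===== SOURCE A (Python) =====
-- def get_mystery(string):
--     sum = 0
--     for length in range(1, len(string)+1):
--         for i in range(len(string)-length):
--             for j in range(i+1, min(len(string)-length+1, i+length)):
--                 if string[i:i+length] == string[j:j+length]:
--                     sum += length
--     return sum
-- ===== SOURCE B (Python) =====
-- def get_mystery(string):
--     n = len(string)
--     total = 0
--     for d in range(1, n):
--         run = 0  # length of the common prefix of the suffixes starting at i and i+d
--         for i in reversed(range(n - d)):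
--             run = run + 1 if string[i] == string[i + d] else 0
--             if run > d:
--                 total += (run * (run + 1) - d * (d + 1)) // 2
--     return total
-- ===== Notes on version B (the rewrite author's own statement) =====
-- stated objective: faster
-- what changed: A compares every overlapping substring pair character-by-character inside a triple loop (O(n^4)); B iterates once per gap d, maintains the common-prefix length of the suffixes i and i+d incrementally right-to-left, and adds each pair's total contribution with a closed-form triangular-number formula, giving O(n^2).
import Mathlib
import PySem

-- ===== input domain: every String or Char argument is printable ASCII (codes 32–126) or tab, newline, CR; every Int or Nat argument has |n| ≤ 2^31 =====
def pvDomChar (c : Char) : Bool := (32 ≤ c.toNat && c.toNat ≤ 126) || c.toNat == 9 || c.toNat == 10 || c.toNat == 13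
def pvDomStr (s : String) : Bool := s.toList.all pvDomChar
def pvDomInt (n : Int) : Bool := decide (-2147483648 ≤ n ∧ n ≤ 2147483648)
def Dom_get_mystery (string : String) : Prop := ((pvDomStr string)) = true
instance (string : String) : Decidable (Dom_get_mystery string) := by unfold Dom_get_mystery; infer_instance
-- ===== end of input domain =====

-- B replaces A's O(n^4) brute-force substring comparisons by an O(n^2) gap-indexed
-- common-prefix DP with a closed-form per-pair sum (alternative algorithm, measurably faster).


-- ===== PORT A =====
def get_mystery (string : String) : Int :=
  (PySem.List.pyRange 1 (PySem.Str.len string + 1) 1).foldl (fun sum length =>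
    (PySem.List.pyRange 0 (PySem.Str.len string - length) 1).foldl (fun sum i =>
      (PySem.List.pyRange (i+1) (min (PySem.Str.len string - length + 1) (i + length)) 1).foldl (fun sum j =>
        if PySem.Str.slice string (some i) (some (i + length)) ==
           PySem.Str.slice string (some j) (some (j + length)) then sum + length else sum) sum) sum) 0

-- ===== PORT B =====
def get_mystery_alt (string : String) : Int :=
  (PySem.List.pyRange 1 (PySem.Str.len string) 1).foldl (fun total d =>
    ((PySem.List.pyRange 0 (PySem.Str.len string - d) 1).reverse.foldl
      (fun (st : Int × Int) i =>
        let run : Int := if PySem.Str.pyGet? string i == PySem.Str.pyGet? string (i + d) then st.1 + 1 else 0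
        (run, if d < run then st.2 + PySem.Int.floordiv (run * (run + 1) - d * (d + 1)) 2 else st.2))
      (0, total)).2) 0

-- ===== PRECONDITION & SPEC =====
def Spec_get_mystery (string : String) (out : Int) : Prop := out = get_mystery_alt string
instance (string : String) (out : Int) : Decidable (Spec_get_mystery string out) := by unfold Spec_get_mystery; infer_instance

-- ===== CLAIM (what is proved, stated in full; the proofs are below) =====
def Claim_equal_get_mystery : Prop := ∀ (string : String), Dom_get_mystery string → Spec_get_mystery string (get_mystery string)

-- ===== LEMMAS AND PROOFS =====

-- length of the common prefix of two lists
def pvLcp : List Char → List Char → Nat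
  | a::as, b::bs => if a = b then pvLcp as bs + 1 else 0
  | _, _ => 0

-- triangular number
def pvTri (k : Nat) : Nat := k * (k + 1) / 2

-- weight contributed by the triple (i, j, ℓ): ℓ when the two length-ℓ substrings at i < j overlap and agree
def pvF (cs : List Char) (i j ℓ : Nat) : Int :=
  if i < j ∧ j - i < ℓ ∧ ℓ ≤ pvLcp (cs.drop i) (cs.drop j) then (ℓ : Int) else 0

-- per-pair closed-form contribution used by B (j = i + d)
def pvC (cs : List Char) (d i : Nat) : Int :=
  if d < pvLcp (cs.drop i) (cs.drop (i + d)) then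
    ((pvTri (pvLcp (cs.drop i) (cs.drop (i + d))) - pvTri d : Nat) : Int) else 0

lemma pvLcp_le_right (xs ys : List Char) : pvLcp xs ys ≤ ys.length := by
  induction xs generalizing ys with
  | nil => cases ys <;> simp [pvLcp]
  | cons a as ih =>
    cases ys with
    | nil => simp [pvLcp]
    | cons b bs =>
      simp only [pvLcp, List.length_cons]
      split_ifs
      · exact Nat.succ_le_succ (ih bs)
      · omega

lemma pvTri_two (k : Nat) : 2 * pvTri k = k * (k + 1) := by
  unfold pvTri
  obtain ⟨r, hr⟩ := Nat.even_mul_succ_self k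
  omega

lemma pvTri_succ (k : Nat) : pvTri (k + 1) = pvTri k + (k + 1) := by
  have h1 := pvTri_two k
  have h2 := pvTri_two (k + 1)
  have e1 : (k + 1) * (k + 1 + 1) = k * (k + 1) + 2 * (k + 1) := by ring
  omega

lemma pvTri_mono {d L : Nat} (h : d ≤ L) : pvTri d ≤ pvTri L :=
  Nat.div_le_div_right (Nat.mul_le_mul h (by omega))

lemma pvGauss (d L : Nat) (h : d ≤ L) :
    (∑ ℓ ∈ Finset.Ico (d + 1) (L + 1), ℓ) = pvTri L - pvTri d := by
  induction L with
  | zero =>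
    interval_cases d
    simp [pvTri]
  | succ L ih =>
    rcases Nat.lt_or_ge d (L + 1) with hd | hd
    · have hs := ih (by omega)
      rw [Finset.sum_Ico_succ_top (by omega : d + 1 ≤ L + 1), hs]
      have ht := pvTri_succ L
      have hm : pvTri d ≤ pvTri L := pvTri_mono (by omega)
      omega
    · have : d = L + 1 := by omega
      subst this
      simp

lemma take_eq_iff_lcp (xs ys : List Char) (ℓ : Nat) (hx : ℓ ≤ xs.length) (hy : ℓ ≤ ys.length) :
    (xs.take ℓ = ys.take ℓ) ↔ ℓ ≤ pvLcp xs ys := by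
  induction ℓ generalizing xs ys with
  | zero => simp
  | succ ℓ ih =>
    cases xs with
    | nil => simp at hx
    | cons a as =>
      cases ys with
      | nil => simp at hy
      | cons b bs =>
        simp only [List.take_succ_cons, List.cons.injEq, pvLcp]
        constructor
        · rintro ⟨rfl, h2⟩
          rw [if_pos rfl]
          have := (ih as bs (by simpa using hx) (by simpa using hy)).mp h2
          omega
        · intro h
          split_ifs at h with hab
          · exact ⟨hab, (ih as bs (by simpa using hx) (by simpa using hy)).mpr (by omega)⟩
          · omega

lemma pvLcp_drop (cs : List Char) (i j : Nat) (hi : i < cs.length) (hj : j < cs.length) :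
    pvLcp (cs.drop i) (cs.drop j) =
      if cs[i] = cs[j] then pvLcp (cs.drop (i + 1)) (cs.drop (j + 1)) + 1 else 0 := by
  rw [List.drop_eq_getElem_cons hi, List.drop_eq_getElem_cons hj]
  rfl

-- fold of an accumulating body over an ascending Python range, as a Finset sum
lemma pv_foldl_pyRange_add (p q : Int) (g : Int → Int) (a : Int) :
    (PySem.List.pyRange p q 1).foldl (fun s x => s + g x) a
      = a + ∑ k ∈ Finset.range (q - p).toNat, g (p + k) := by
  obtain ⟨m, hm⟩ : ∃ m, (q - p).toNat = m := ⟨_, rfl⟩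
  induction m generalizing p a with
  | zero =>
    rw [PySem.List.pyRange_one_eq_nil (by omega)]
    simp [hm]
  | succ m ih =>
    rw [PySem.List.pyRange_one_cons (by omega)]
    simp only [List.foldl_cons]
    rw [ih (p + 1) (a + g p) (by omega)]
    rw [show (q - (p + 1)).toNat = m from by omega, hm,
      Finset.sum_range_succ' (fun k => g (p + (k : Int))) m,
      show g (p + ((0 : Nat) : Int)) = g p from congrArg g (by norm_num)]
    have hS : (∑ k ∈ Finset.range m, g (p + 1 + (k : Int)))
        = ∑ k ∈ Finset.range m, g (p + ((k + 1 : Nat) : Int)) :=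
      Finset.sum_congr rfl fun k _ => congrArg g (by push_cast; ring)
    rw [hS]
    ring

lemma pv_foldl_pyRange_ite_add (p q : Int) (c : Int → Bool) (w : Int) (a : Int) :
    (PySem.List.pyRange p q 1).foldl (fun s x => if c x then s + w else s) a
      = a + ∑ k ∈ Finset.range (q - p).toNat, (if c (p + k) then w else 0) := by
  rw [PySem.List.foldl_congr_mem _ _ (fun s x => s + if c x then w else 0) _
    (fun acc x _ => by by_cases hcx : c x <;> simp [hcx])]
  exact pv_foldl_pyRange_add p q _ a

-- drop vacuous tail of a range sum
lemma pv_sum_range_drop (M m : Nat) (h : m ≤ M) (H : Nat → Int)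
    (h0 : ∀ i, m ≤ i → i < M → H i = 0) :
    (∑ i ∈ Finset.range M, H i) = ∑ i ∈ Finset.range m, H i := by
  refine (Finset.sum_subset (by intro x hx; simp only [Finset.mem_range] at *; omega) ?_).symm
  intro x hx hnx
  exact h0 x (by simpa using hnx) (by simpa using hx)

-- ===== A-side =====
-- A's slice-equality test, characterised by the common-prefix length
lemma pvSliceCond (s : String) (x y l : Int) (i j ℓ : Nat) (hx : x = (i : Int))
    (hy : y = (j : Int)) (hl : l = (ℓ : Int))
    (hi : i + ℓ ≤ s.toList.length) (hj : j + ℓ ≤ s.toList.length) :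
    ((PySem.Str.slice s (some x) (some (x + l)) ==
      PySem.Str.slice s (some y) (some (y + l))) = true)
      ↔ ℓ ≤ pvLcp (s.toList.drop i) (s.toList.drop j) := by
  subst hx; subst hy; subst hl
  rw [beq_iff_eq, ← String.toList_inj, PySem.Str.toList_slice, PySem.Str.toList_slice]
  rw [show PySem.Chars.slice s.toList (some (i : Int)) (some ((i : Int) + (ℓ : Int)))
      = (s.toList.drop i).take ℓ from PySem.List.slice_natCast_add s.toList i ℓ]
  rw [show PySem.Chars.slice s.toList (some (j : Int)) (some ((j : Int) + (ℓ : Int)))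
      = (s.toList.drop j).take ℓ from PySem.List.slice_natCast_add s.toList j ℓ]
  exact take_eq_iff_lcp _ _ ℓ (by rw [List.length_drop]; omega) (by rw [List.length_drop]; omega)

lemma pvA_eq (s : String) :
    get_mystery s = ∑ ℓ ∈ Finset.range (s.toList.length + 1), ∑ i ∈ Finset.range s.toList.length,
      ∑ j ∈ Finset.range s.toList.length, pvF s.toList i j ℓ := by
  unfold get_mystery
  rw [PySem.Str.len_eq]
  simp only [pv_foldl_pyRange_ite_add, pv_foldl_pyRange_add, zero_add]
  rw [show ((s.toList.length : Int) + 1 - 1).toNat = s.toList.length from by omega,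
    Finset.sum_range_succ'
      (fun ℓ => ∑ i ∈ Finset.range s.toList.length, ∑ j ∈ Finset.range s.toList.length,
        pvF s.toList i j ℓ) s.toList.length,
    show (∑ i ∈ Finset.range s.toList.length, ∑ j ∈ Finset.range s.toList.length,
        pvF s.toList i j 0) = 0 from
      Finset.sum_eq_zero fun i _ => Finset.sum_eq_zero fun j _ => by
        unfold pvF; rw [if_neg]; rintro ⟨_, h2, _⟩; omega,
    add_zero]
  refine Finset.sum_congr rfl fun k hk => ?_
  simp only [Finset.mem_range] at hk
  rw [show ((s.toList.length : Int) - (1 + (k : Int)) - 0).toNat = s.toList.length - (k + 1)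
    from by omega]
  have hz : ∀ i2, s.toList.length - (k + 1) ≤ i2 → i2 < s.toList.length →
      (∑ j ∈ Finset.range s.toList.length, pvF s.toList i2 j (k + 1)) = 0 := by
    intro i2 h1 h2
    refine Finset.sum_eq_zero fun j hjm => ?_
    simp only [Finset.mem_range] at hjm
    have hLe := pvLcp_le_right (s.toList.drop i2) (s.toList.drop j)
    rw [List.length_drop] at hLe
    unfold pvF
    rw [if_neg]
    rintro ⟨ha, hb, hc⟩
    omega
  rw [pv_sum_range_drop s.toList.length (s.toList.length - (k + 1)) (by omega) _ hz]
  refine Finset.sum_congr rfl fun i2 hi2 => ?_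
  simp only [Finset.mem_range] at hi2
  have hsub : Finset.Ico (i2 + 1) (min (s.toList.length - (k + 1) + 1) (i2 + (k + 1)))
      ⊆ Finset.range s.toList.length := by
    intro x hx
    simp only [Finset.mem_Ico] at hx
    simp only [Finset.mem_range]
    omega
  have hz2 : ∀ j ∈ Finset.range s.toList.length,
      j ∉ Finset.Ico (i2 + 1) (min (s.toList.length - (k + 1) + 1) (i2 + (k + 1))) →
      pvF s.toList i2 j (k + 1) = 0 := by
    intro j hjm hjI
    simp only [Finset.mem_range] at hjm
    simp only [Finset.mem_Ico, not_and, not_lt] at hjI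
    have hLe := pvLcp_le_right (s.toList.drop i2) (s.toList.drop j)
    rw [List.length_drop] at hLe
    unfold pvF
    rw [if_neg]
    rintro ⟨ha, hb, hc⟩
    omega
  rw [← Finset.sum_subset hsub hz2, Finset.sum_Ico_eq_sum_range,
    show (min ((s.toList.length : Int) - (1 + (k : Int)) + 1) ((i2 : Int) + (1 + (k : Int)))
        - ((i2 : Int) + 1)).toNat
      = min (s.toList.length - (k + 1) + 1) (i2 + (k + 1)) - (i2 + 1) from by omega]
  refine Finset.sum_congr rfl fun k3 hk3 => ?_
  simp only [Finset.mem_range] at hk3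
  unfold pvF
  rw [if_congr (pvSliceCond s ((i2 : Nat) : Int) ((i2 : Int) + 1 + (k3 : Int)) (1 + (k : Int))
    i2 (i2 + 1 + k3) (k + 1) rfl (by push_cast; ring) (by push_cast; ring)
    (by omega) (by omega)) rfl rfl]
  rw [if_congr (show (i2 < i2 + 1 + k3 ∧ i2 + 1 + k3 - i2 < k + 1 ∧
        k + 1 ≤ pvLcp (s.toList.drop i2) (s.toList.drop (i2 + 1 + k3)))
      ↔ (k + 1 ≤ pvLcp (s.toList.drop i2) (s.toList.drop (i2 + 1 + k3)))
      from ⟨fun h => h.2.2, fun h => ⟨by omega, by omega, h⟩⟩) rfl rfl]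
  split_ifs with h
  · push_cast; ring
  · rfl

-- ===== B-side =====
lemma pvLcp_nil_right (xs : List Char) : pvLcp xs [] = 0 := by cases xs <;> rfl

-- B's inner loop body, named so the fold steps stay foldable
def pvStep (s : String) (dI : Int) : Int × Int → Nat → Int × Int := fun st k =>
  let run : Int := if PySem.Str.pyGet? s (k : Int) == PySem.Str.pyGet? s ((k : Int) + dI) then st.1 + 1 else 0
  (run, if dI < run then st.2 + PySem.Int.floordiv (run * (run + 1) - dI * (dI + 1)) 2 else st.2)

-- exact floor-division form of the closed-form sum
lemma pvFdiv (d L : Nat) (h : d < L) :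
    PySem.Int.floordiv ((L : Int) * ((L : Int) + 1) - (d : Int) * ((d : Int) + 1)) 2
      = ((pvTri L - pvTri d : Nat) : Int) := by
  have hmul : d * (d + 1) ≤ L * (L + 1) := Nat.mul_le_mul (by omega) (by omega)
  have e1 : ((L : Int) * ((L : Int) + 1) - (d : Int) * ((d : Int) + 1))
      = ((L * (L + 1) - d * (d + 1) : Nat) : Int) := by
    push_cast [hmul]; ring
  rw [e1, show (2 : Int) = ((2 : Nat) : Int) from rfl, PySem.Int.floordiv_natCast]
  have t1 := pvTri_two L
  have t2 := pvTri_two d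
  congr 1
  omega

-- inner (right-to-left) loop invariant: the first state component is the common-prefix
-- length of the suffixes at the current position and at offset d
lemma pvInner (s : String) (d' : Nat) (hd : 1 ≤ d') (m : Nat)
    (hm : m + d' ≤ s.toList.length) (t : Int) :
    ((List.range m).reverse.foldl (pvStep s (d' : Int))
      (((pvLcp (s.toList.drop m) (s.toList.drop (m + d')) : Nat) : Int), t))
    = (((pvLcp s.toList (s.toList.drop d') : Nat) : Int),
        t + ∑ i ∈ Finset.range m, pvC s.toList d' i) := by
  induction m generalizing t with
  | zero => simp
  | succ m ih =>
    have hmN : m + d' < s.toList.length := by omega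
    have hmN' : m < s.toList.length := by omega
    simp only [List.range_succ, List.reverse_append, List.reverse_cons, List.reverse_nil,
      List.nil_append, List.cons_append]
    rw [List.foldl_cons]
    have hL := pvLcp_drop s.toList m (m + d') hmN' hmN
    have hcond : ((PySem.Str.pyGet? s (m : Int) == PySem.Str.pyGet? s ((m : Int) + (d' : Int))) = true)
        ↔ s.toList[m] = s.toList[m + d'] := by
      rw [show ((m : Int) + (d' : Int)) = ((m + d' : Nat) : Int) from by push_cast; ring,
        PySem.Str.pyGet?_natCast, PySem.Str.pyGet?_natCast,
        List.getElem?_eq_getElem hmN', List.getElem?_eq_getElem hmN]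
      simp
    have hstep :
        pvStep s (d' : Int)
          (((pvLcp (s.toList.drop (m + 1)) (s.toList.drop (m + 1 + d')) : Nat) : Int), t) m
        = (((pvLcp (s.toList.drop m) (s.toList.drop (m + d')) : Nat) : Int),
            t + pvC s.toList d' m) := by
      unfold pvStep
      dsimp only
      rw [show m + 1 + d' = m + d' + 1 from by omega]
      by_cases hc : s.toList[m] = s.toList[m + d']
      · rw [if_pos (hcond.mpr hc)]
        have hLval : pvLcp (s.toList.drop m) (s.toList.drop (m + d'))
            = pvLcp (s.toList.drop (m + 1)) (s.toList.drop (m + d' + 1)) + 1 := by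
          rw [hL, if_pos hc]
        set L' := pvLcp (s.toList.drop (m + 1)) (s.toList.drop (m + d' + 1)) with hL'
        rw [hLval]
        rw [show ((L' : Int) + 1) = ((L' + 1 : Nat) : Int) from by push_cast; ring]
        unfold pvC
        rw [hLval]
        by_cases hdl : d' < L' + 1
        · rw [if_pos (by exact_mod_cast hdl), if_pos hdl,
            pvFdiv d' (L' + 1) hdl]
        · rw [if_neg (by exact_mod_cast hdl), if_neg hdl, add_zero]
      · rw [if_neg (fun h => hc (hcond.mp h))]
        have hLval : pvLcp (s.toList.drop m) (s.toList.drop (m + d')) = 0 := by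
          rw [hL, if_neg hc]
        rw [hLval]
        rw [if_neg (by simp)]
        unfold pvC
        rw [hLval, if_neg (by omega)]
        simp
    rw [show m + 1 + d' = m + d' + 1 from by omega] at hstep ⊢
    rw [hstep, ih (by omega) (t + pvC s.toList d' m), Finset.sum_range_succ]
    ring_nf

-- per-pair value of the ℓ-sum of pvF
lemma pvPair (cs : List Char) (i j : Nat) (hj : j < cs.length) :
    (∑ ℓ ∈ Finset.range (cs.length + 1), pvF cs i j ℓ)
      = if i < j then pvC cs (j - i) i else 0 := by
  by_cases hij : i < j
  · rw [if_pos hij]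
    have hL : pvLcp (cs.drop i) (cs.drop j) ≤ cs.length - j := by
      have h := pvLcp_le_right (cs.drop i) (cs.drop j)
      simpa [List.length_drop] using h
    have hsub : Finset.Ico (j - i + 1) (pvLcp (cs.drop i) (cs.drop j) + 1)
        ⊆ Finset.range (cs.length + 1) := by
      intro x hx
      simp only [Finset.mem_Ico] at hx
      simp only [Finset.mem_range]
      omega
    have hzero : ∀ ℓ ∈ Finset.range (cs.length + 1),
        ℓ ∉ Finset.Ico (j - i + 1) (pvLcp (cs.drop i) (cs.drop j) + 1) → pvF cs i j ℓ = 0 := by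
      intro ℓ _ hℓ
      simp only [Finset.mem_Ico, not_and, not_lt] at hℓ
      unfold pvF
      rw [if_neg]
      rintro ⟨h1, h2, h3⟩
      omega
    rw [← Finset.sum_subset hsub hzero]
    have hval : ∀ ℓ ∈ Finset.Ico (j - i + 1) (pvLcp (cs.drop i) (cs.drop j) + 1),
        pvF cs i j ℓ = (ℓ : Int) := by
      intro ℓ hℓ
      simp only [Finset.mem_Ico] at hℓ
      unfold pvF
      rw [if_pos ⟨hij, by omega, by omega⟩]
    rw [Finset.sum_congr rfl hval]
    unfold pvC
    rw [show i + (j - i) = j from by omega]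
    by_cases hdl : j - i < pvLcp (cs.drop i) (cs.drop j)
    · rw [if_pos hdl,
        show (∑ ℓ ∈ Finset.Ico (j - i + 1) (pvLcp (cs.drop i) (cs.drop j) + 1), (ℓ : Int))
          = ((∑ ℓ ∈ Finset.Ico (j - i + 1) (pvLcp (cs.drop i) (cs.drop j) + 1), ℓ : Nat) : Int)
          from (Nat.cast_sum _ _).symm,
        pvGauss (j - i) _ (by omega)]
    · rw [if_neg hdl,
        show Finset.Ico (j - i + 1) (pvLcp (cs.drop i) (cs.drop j) + 1) = ∅
          from Finset.Ico_eq_empty (by omega)]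
      simp
  · rw [if_neg hij]
    refine Finset.sum_eq_zero fun ℓ _ => ?_
    unfold pvF
    rw [if_neg (by rintro ⟨h1, _, _⟩; exact hij h1)]

-- reindex pairs (gap, left end) → (left end, right end)
lemma pvReindex (n : Nat) (g : Nat → Nat → Int) :
    (∑ k ∈ Finset.range (n - 1), ∑ i ∈ Finset.range (n - (k + 1)), g (k + 1) i)
      = ∑ i ∈ Finset.range n, ∑ j ∈ Finset.range n, (if i < j then g (j - i) i else 0) := by
  have hfil : ∀ i : Nat, (∑ j ∈ Finset.range n, if i < j then g (j - i) i else 0)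
      = ∑ j ∈ (Finset.range n).filter (fun j => i < j), g (j - i) i :=
    fun i => (Finset.sum_filter _ _).symm
  rw [Finset.sum_congr rfl (fun i _ => hfil i), Finset.sum_sigma', Finset.sum_sigma']
  refine Finset.sum_nbij' (fun p => ⟨p.2, p.2 + p.1 + 1⟩) (fun p => ⟨p.2 - p.1 - 1, p.1⟩)
    ?_ ?_ ?_ ?_ ?_
  · rintro ⟨k, i⟩ hk
    simp [Finset.mem_sigma, Finset.mem_filter] at hk ⊢
    omega
  · rintro ⟨i, j⟩ hj
    simp [Finset.mem_sigma, Finset.mem_filter] at hj ⊢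
    omega
  · rintro ⟨k, i⟩ hk
    simp [Finset.mem_sigma] at hk
    simp [Sigma.mk.injEq]
    omega
  · rintro ⟨i, j⟩ hj
    simp [Finset.mem_sigma, Finset.mem_filter] at hj
    simp [Sigma.mk.injEq]
    omega
  · rintro ⟨k, i⟩ hk
    simp only
    rw [show i + k + 1 - i = k + 1 from by omega]

lemma pvB_eq (s : String) :
    get_mystery_alt s = ∑ i ∈ Finset.range s.toList.length, ∑ j ∈ Finset.range s.toList.length,
      ∑ ℓ ∈ Finset.range (s.toList.length + 1), pvF s.toList i j ℓ := by
  unfold get_mystery_alt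
  rw [PySem.Str.len_eq]
  rw [PySem.List.foldl_congr_mem _ _
    (fun total d => total + ∑ i ∈ Finset.range (s.toList.length - d.toNat), pvC s.toList d.toNat i) _ ?hbody]
  case hbody =>
    intro acc x hx
    rw [PySem.List.mem_pyRange_one] at hx
    obtain ⟨d', rfl⟩ : ∃ d' : Nat, x = (d' : Int) := ⟨x.toNat, by omega⟩
    have hd1 : 1 ≤ d' := by exact_mod_cast hx.1
    have hdN : d' < s.toList.length := by exact_mod_cast hx.2
    rw [show ((s.toList.length : Int) - (d' : Int)) = ((s.toList.length - d' : Nat) : Int) from by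
      push_cast [Nat.cast_sub (le_of_lt hdN)]; ring]
    rw [PySem.List.pyRange_zero_natCast, ← List.map_reverse, List.foldl_map]
    show (List.foldl (pvStep s ((d' : Nat) : Int)) ((0 : Int), acc)
      ((List.range (s.toList.length - d')).reverse)).2 = _
    have hinv := pvInner s d' hd1 (s.toList.length - d') (by omega) acc
    rw [show (s.toList.length - d') + d' = s.toList.length from by omega, List.drop_length,
      pvLcp_nil_right, Nat.cast_zero] at hinv
    rw [hinv]
    simp
  rw [pv_foldl_pyRange_add, zero_add,
    show ((s.toList.length : Int) - 1).toNat = s.toList.length - 1 from by omega]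
  have h1 : ∀ k ∈ Finset.range (s.toList.length - 1),
      (∑ i ∈ Finset.range (s.toList.length - ((1 : Int) + (k : Int)).toNat),
          pvC s.toList ((1 : Int) + (k : Int)).toNat i)
        = ∑ i ∈ Finset.range (s.toList.length - (k + 1)), pvC s.toList (k + 1) i := by
    intro k _
    rw [show ((1 : Int) + (k : Int)).toNat = k + 1 from by omega]
  rw [Finset.sum_congr rfl h1, pvReindex s.toList.length (fun d i => pvC s.toList d i)]
  refine Finset.sum_congr rfl fun i hi => Finset.sum_congr rfl fun j hj => ?_
  rw [pvPair s.toList i j (by simpa using hj)]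

-- ===== VERDICT (by name: the statement is the Claim_ definition above) =====
theorem get_mystery_spec : Claim_equal_get_mystery := by
  intro s _
  unfold Spec_get_mystery
  rw [pvA_eq, pvB_eq]
  exact Finset.sum_comm.trans (Finset.sum_congr rfl fun i _ => Finset.sum_comm)
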